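-- pv_equiv track=rewrite | github.com/PedroJuanSoto/Diagonal-Test | power_of_three_formula.py | base_three_recovery
-- ===== SOURCE A (Python) =====
-- def base_three_recovery(S):
-- 	n = 0
-- 	found_one = False
-- 	index = 0
-- 	for i,s in enumerate(S):
-- 		if s != 0 and found_one == False:
-- 			n+= S[i]*3**i
-- 			found_one = True
-- 			index = i
-- 	for i,s in enumerate(S):
-- 		if i > index:
-- 			n+= 2*S[i]*3**i
-- 	return n
-- ===== SOURCE B (Python) =====
-- def base_three_recovery(S):
--     total = 2 * sum(s * 3**i for i, s in enumerate(S))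
--     first = next(((i, s) for i, s in enumerate(S) if s != 0), None)
--     if first is not None:
--         i, s = first
--         total -= s * 3**i
--     return total
-- ===== Notes on version B (the rewrite author's own statement) =====
-- stated objective: simpler
-- what changed: B computes the doubled weighted sum 2*sum(s*3^i) in one pass and subtracts the first nonzero digit's weight once, replacing A's stateful two-loop scan with a found flag and index variable.
import Mathlib
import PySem

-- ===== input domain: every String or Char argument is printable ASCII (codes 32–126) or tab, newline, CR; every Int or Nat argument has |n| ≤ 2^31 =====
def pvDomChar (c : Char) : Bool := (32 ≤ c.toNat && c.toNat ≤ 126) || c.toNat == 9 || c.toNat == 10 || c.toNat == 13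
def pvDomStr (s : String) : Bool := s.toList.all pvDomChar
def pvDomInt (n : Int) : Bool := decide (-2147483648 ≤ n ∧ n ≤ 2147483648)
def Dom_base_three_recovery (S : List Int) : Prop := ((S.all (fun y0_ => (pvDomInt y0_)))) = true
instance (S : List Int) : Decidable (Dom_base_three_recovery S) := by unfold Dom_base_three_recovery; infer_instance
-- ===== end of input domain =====

-- B replaces A's stateful two-loop scan (found flag + index) by a doubled weighted sum with a
-- single correction for the first nonzero digit; same O(n) cost, shorter code.

-- ===== PORT A =====
-- state (n, found_one, index); S[i] inside the loops equals the current enumerate value s (= p.2)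
def base_three_recovery (S : List Int) : Int :=
  let st := (PySem.List.enumerate S).foldl
    (fun (acc : Int × Bool × Int) (p : Int × Int) =>
      if p.2 ≠ 0 ∧ acc.2.1 = false then (acc.1 + p.2 * 3 ^ p.1.toNat, true, p.1) else acc)
    (0, false, 0)
  (PySem.List.enumerate S).foldl
    (fun (n : Int) (p : Int × Int) => if p.1 > st.2.2 then n + 2 * p.2 * 3 ^ p.1.toNat else n)
    st.1

-- ===== PORT B =====
-- next(((i, s) for i, s in enumerate(S) if s != 0), None)
def pvFirstNonzero : List (Int × Int) → Option (Int × Int)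
  | [] => none
  | p :: rest => if p.2 ≠ 0 then some p else pvFirstNonzero rest

def base_three_recovery_alt (S : List Int) : Int :=
  let total := 2 * (PySem.List.enumerate S).foldl (fun (t : Int) (p : Int × Int) => t + p.2 * 3 ^ p.1.toNat) 0
  match pvFirstNonzero (PySem.List.enumerate S) with
  | none => total
  | some (i, s) => total - s * 3 ^ i.toNat

-- ===== PRECONDITION & SPEC =====
def Spec_base_three_recovery (S : List Int) (out : Int) : Prop := out = base_three_recovery_alt S
instance (S : List Int) (out : Int) : Decidable (Spec_base_three_recovery S out) := by unfold Spec_base_three_recovery; infer_instance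

-- ===== CLAIM (what is proved, stated in full; the proofs are below) =====
def Claim_equal_base_three_recovery : Prop := ∀ (S : List Int), Dom_base_three_recovery S → Spec_base_three_recovery S (base_three_recovery S)

-- ===== LEMMAS AND PROOFS =====

/-- weighted base-three sum of `S` with the first digit at power `k` -/
def pvWsum : List Int → Nat → Int
  | [], _ => 0
  | x :: xs, k => x * 3 ^ k + pvWsum xs (k + 1)

theorem pv_foldl_total (S : List Int) : ∀ (k : Nat) (t : Int),
    (PySem.List.enumerate S (k : Int)).foldl (fun (t : Int) (p : Int × Int) => t + p.2 * 3 ^ p.1.toNat) t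
      = t + pvWsum S k := by
  induction S with
  | nil => intro k t; simp [PySem.List.enumerate_nil, pvWsum]
  | cons x xs ih =>
    intro k t
    rw [PySem.List.enumerate_cons]
    have : ((k : Int) + 1) = ((k + 1 : Nat) : Int) := by push_cast; ring
    simp only [List.foldl_cons, this, ih, pvWsum, Int.toNat_natCast]
    ring

theorem pv_foldA_true (S : List Int) : ∀ (k : Int) (n : Int) (idx : Int),
    (PySem.List.enumerate S k).foldl
      (fun (acc : Int × Bool × Int) (p : Int × Int) =>
        if p.2 ≠ 0 ∧ acc.2.1 = false then (acc.1 + p.2 * 3 ^ p.1.toNat, true, p.1) else acc)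
      (n, true, idx) = (n, true, idx) := by
  induction S with
  | nil => intro k n idx; simp [PySem.List.enumerate_nil]
  | cons x xs ih =>
    intro k n idx
    rw [PySem.List.enumerate_cons]
    simp [ih]

theorem pv_foldB_gt (S : List Int) : ∀ (k : Nat) (c : Int) (n : Int), c < (k : Int) →
    (PySem.List.enumerate S (k : Int)).foldl
      (fun (n : Int) (p : Int × Int) => if p.1 > c then n + 2 * p.2 * 3 ^ p.1.toNat else n) n
      = n + 2 * pvWsum S k := by
  induction S with
  | nil => intro k c n _; simp [PySem.List.enumerate_nil, pvWsum]
  | cons x xs ih =>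
    intro k c n hc
    rw [PySem.List.enumerate_cons]
    have hk1 : ((k : Int) + 1) = ((k + 1 : Nat) : Int) := by push_cast; ring
    have hc1 : c < ((k + 1 : Nat) : Int) := by push_cast; omega
    simp only [List.foldl_cons, hk1, if_pos hc, ih _ _ _ hc1, pvWsum, Int.toNat_natCast]
    ring

theorem pv_main (S : List Int) : ∀ (k : Nat),
    (let st := (PySem.List.enumerate S (k : Int)).foldl
        (fun (acc : Int × Bool × Int) (p : Int × Int) =>
          if p.2 ≠ 0 ∧ acc.2.1 = false then (acc.1 + p.2 * 3 ^ p.1.toNat, true, p.1) else acc)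
        (0, false, 0)
     (PySem.List.enumerate S (k : Int)).foldl
        (fun (n : Int) (p : Int × Int) => if p.1 > st.2.2 then n + 2 * p.2 * 3 ^ p.1.toNat else n)
        st.1)
    = (let total := 2 * (PySem.List.enumerate S (k : Int)).foldl
          (fun (t : Int) (p : Int × Int) => t + p.2 * 3 ^ p.1.toNat) 0
       match pvFirstNonzero (PySem.List.enumerate S (k : Int)) with
       | none => total
       | some (i, s) => total - s * 3 ^ i.toNat) := by
  induction S with
  | nil => intro k; simp [PySem.List.enumerate_nil, pvFirstNonzero]
  | cons x xs ih =>
    intro k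
    rw [PySem.List.enumerate_cons]
    have hk1 : ((k : Int) + 1) = ((k + 1 : Nat) : Int) := by push_cast; ring
    by_cases hx : x = 0
    · -- zero head: both sides reduce to the same expressions over the tail
      subst hx
      simp only [List.foldl_cons, pvFirstNonzero, ne_eq, not_true_eq_false,
        if_neg, ite_self, hk1, mul_zero, zero_mul, add_zero,
        not_false_eq_true, and_true]
      exact ih (k + 1)
    · -- nonzero head: first loop fixes (x·3^k, found, k); the rest is arithmetic
      simp only [List.foldl_cons, pvFirstNonzero, hx, ne_eq, not_false_eq_true, and_true,
        if_pos, hk1]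
      rw [pv_foldA_true]
      simp only [pv_foldl_total, pv_foldB_gt xs (k+1) (k:Int) _ (by push_cast; omega)]
      have : ¬ ((k : Int) > (k : Int)) := by omega
      rw [if_neg this]
      simp only [Int.toNat_natCast]
      ring

-- ===== VERDICT (by name: the statement is the Claim_ definition above) =====
theorem base_three_recovery_spec : Claim_equal_base_three_recovery := by
  intro S _
  unfold Spec_base_three_recovery base_three_recovery base_three_recovery_alt
  have h := pv_main S 0
  simpa using h
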